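-- pv_equiv track=rewrite | github.com/Gabriel-Panza/Prog-Python-Exercises-UFF | Test/Iluminacao.py | contar_trechos_escuros
-- ===== SOURCE A (Python) =====
-- def contar_trechos_escuros(n, potencias):
--     contagem = 0
--     max_contagem = 0
--
--     for i in range(n):
--         if potencias[i] + potencias[(i+1)%n] < 1000:
--             contagem += 1
--             max_contagem = max(max_contagem, contagem)
--         else:
--             contagem = 0
--
--     return max_contagem
-- ===== SOURCE B (Python) =====
-- def contar_trechos_escuros(n, potencias):
--     # build the circular "dark segment" flags, then scan maximal runs
--     darks = [potencias[i] + potencias[(i + 1) % n] < 1000 for i in range(n)]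
--     best = 0
--     i, m = 0, len(darks)
--     while i < m:
--         b = darks[i]
--         j = i + 1
--         while j < m and darks[j] == b:
--             j += 1
--         if b:
--             best = max(best, j - i)
--         i = j
--     return best
-- ===== Notes on version B (the rewrite author's own statement) =====
-- stated objective: alternative
-- what changed: B first materialises the boolean list of dark segments and then finds the longest True run by splitting it into maximal runs with a two-pointer scan, instead of A's fused running-counter/reset loop with an incremental max.
import Mathlib
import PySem

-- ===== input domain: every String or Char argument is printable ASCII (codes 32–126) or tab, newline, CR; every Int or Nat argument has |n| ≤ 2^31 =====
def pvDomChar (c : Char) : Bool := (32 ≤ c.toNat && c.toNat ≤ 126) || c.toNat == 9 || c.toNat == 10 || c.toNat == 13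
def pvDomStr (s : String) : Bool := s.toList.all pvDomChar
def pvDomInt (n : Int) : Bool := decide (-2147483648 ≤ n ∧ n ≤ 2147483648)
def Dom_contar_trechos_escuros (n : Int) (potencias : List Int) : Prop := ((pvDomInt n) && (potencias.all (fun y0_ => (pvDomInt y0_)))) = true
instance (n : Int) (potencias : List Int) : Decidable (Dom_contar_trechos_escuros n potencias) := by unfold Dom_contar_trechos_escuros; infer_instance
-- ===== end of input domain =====

-- B builds the list of dark-segment flags and scans its maximal runs; alternative decomposition, same cost.

-- ===== PORT A =====
-- A: single loop keeping a running counter reset on a bright segment and an incremental max.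
def contar_trechos_escuros (n : Int) (potencias : List Int) : Int :=
  ((PySem.List.pyRange 0 n 1).foldl
    (fun (st : Int × Int) i =>
      if PySem.List.pyGetD potencias i 0 + PySem.List.pyGetD potencias (PySem.Int.mod (i + 1) n) 0 < 1000 then
        (st.1 + 1, max st.2 (st.1 + 1))
      else
        (0, st.2))
    (0, 0)).2

-- ===== PORT B =====
-- B helper: the inner two-pointer scan over maximal runs (leading run via takeWhile/dropWhile).
def pvRunGo (l : List Bool) (best : Int) : Int :=
  match l with
  | [] => best
  | b :: t =>
    pvRunGo (t.dropWhile (· == b))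
      (if b then max best (((t.takeWhile (· == b)).length : Int) + 1) else best)
termination_by l.length
decreasing_by
  simp only [List.length_cons]
  exact Nat.lt_succ_of_le (List.length_dropWhile_le _ _)

def contar_trechos_escuros_alt (n : Int) (potencias : List Int) : Int :=
  pvRunGo
    ((PySem.List.pyRange 0 n 1).map
      (fun i => decide (PySem.List.pyGetD potencias i 0 + PySem.List.pyGetD potencias (PySem.Int.mod (i + 1) n) 0 < 1000)))
    0

-- ===== PRECONDITION & SPEC =====
-- Pre_ excludes exactly the inputs where Python A raises IndexError (n exceeding the list length).
def Pre_contar_trechos_escuros (n : Int) (potencias : List Int) : Prop :=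
  n ≤ (potencias.length : Int)
instance (n : Int) (potencias : List Int) : Decidable (Pre_contar_trechos_escuros n potencias) := by
  unfold Pre_contar_trechos_escuros; infer_instance

def pvWitness_contar_trechos_escuros : Int × List Int := (3, [400, 400, 700])

def Spec_contar_trechos_escuros (n : Int) (potencias : List Int) (out : Int) : Prop := out = contar_trechos_escuros_alt n potencias
instance (n : Int) (potencias : List Int) (out : Int) : Decidable (Spec_contar_trechos_escuros n potencias out) := by unfold Spec_contar_trechos_escuros; infer_instance

-- ===== CLAIM (what is proved, stated in full; the proofs are below) =====
def Claim_equal_contar_trechos_escuros : Prop := ∀ (n : Int) (potencias : List Int), Dom_contar_trechos_escuros n potencias → Pre_contar_trechos_escuros n potencias → Spec_contar_trechos_escuros n potencias (contar_trechos_escuros n potencias)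

-- ===== LEMMAS AND PROOFS =====

-- reference function: pvM l c = best achievable run length, with current run c before l
def pvM (l : List Bool) (c : Int) : Int :=
  match l with
  | [] => c
  | true :: t => pvM t (c + 1)
  | false :: t => max c (pvM t 0)

theorem pvM_ge (l : List Bool) (c : Int) : c ≤ pvM l c := by
  induction l generalizing c with
  | nil => exact le_refl _
  | cons b t ih =>
    cases b with
    | true => exact le_trans (by omega) (ih (c + 1))
    | false => simp [pvM]

theorem pvM_true_run (r : List Bool) (rest : List Bool) (c : Int)
    (h : ∀ b ∈ r, b = true) : pvM (r ++ rest) c = pvM rest (c + r.length) := by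
  induction r generalizing c with
  | nil => simp
  | cons b t ih =>
    have hb : b = true := h b (by simp)
    subst hb
    have ht : ∀ b ∈ t, b = true := fun b hb => h b (by simp [hb])
    simp only [List.cons_append, pvM, ih (c + 1) ht, List.length_cons]
    congr 1
    push_cast
    ring

theorem pvM_false_run (r : List Bool) (rest : List Bool)
    (h : ∀ b ∈ r, b = false) : pvM (r ++ rest) 0 = pvM rest 0 := by
  induction r with
  | nil => simp
  | cons b t ih =>
    have hb : b = false := h b (by simp)
    subst hb
    have ht : ∀ b ∈ t, b = false := fun b hb => h b (by simp [hb])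
    simp only [List.cons_append, pvM, ih ht]
    have := pvM_ge rest 0
    omega

theorem pvM_not_true_head (rest : List Bool) (k : Int)
    (h : rest.head? ≠ some true) (hk : 0 ≤ k) : pvM rest k = max k (pvM rest 0) := by
  cases rest with
  | nil => simp only [pvM]; omega
  | cons b t =>
    cases b with
    | true => simp at h
    | false =>
      simp only [pvM]
      have := pvM_ge t 0
      omega

-- A's scan, abstracted over the flag list
def pvScanA (l : List Bool) (c m : Int) : Int :=
  match l with
  | [] => m
  | true :: t => pvScanA t (c + 1) (max m (c + 1))
  | false :: t => pvScanA t 0 m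

theorem pvScanA_eq (l : List Bool) (c m : Int) (hc : 0 ≤ c) (hcm : c ≤ m) :
    pvScanA l c m = max m (pvM l c) := by
  induction l generalizing c m with
  | nil =>
    simp only [pvScanA, pvM]
    omega
  | cons b t ih =>
    cases b with
    | true =>
      simp only [pvScanA, pvM]
      rw [ih (c + 1) (max m (c + 1)) (by omega) (by omega)]
      have := pvM_ge t (c + 1)
      omega
    | false =>
      simp only [pvScanA, pvM]
      rw [ih 0 m (by omega) (by omega)]
      have := pvM_ge t 0
      omega

theorem foldl_eq_pvScanA (p : Int → Prop) [DecidablePred p] (l : List Int) (c m : Int) :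
    (l.foldl
      (fun (st : Int × Int) i => if p i then (st.1 + 1, max st.2 (st.1 + 1)) else (0, st.2))
      (c, m)).2 = pvScanA (l.map (fun i => decide (p i))) c m := by
  induction l generalizing c m with
  | nil => rfl
  | cons i t ih =>
    by_cases h : p i <;> simp [pvScanA, h, ih]

theorem pvRunGo_eq (l : List Bool) (best : Int) (hb : 0 ≤ best) :
    pvRunGo l best = max best (pvM l 0) := by
  induction hn : l.length using Nat.strong_induction_on generalizing l best with
  | _ n ih' =>
  subst hn
  have ih : ∀ (l' : List Bool), l'.length < l.length → ∀ best, 0 ≤ best → pvRunGo l' best = max best (pvM l' 0) :=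
    fun l' h best hb => ih' l'.length h l' best hb rfl
  clear ih'
  cases l with
  | nil => simp only [pvRunGo, pvM]; omega
  | cons b t =>
    rw [pvRunGo]
    set run := t.takeWhile (· == b) with hrun
    set rest := t.dropWhile (· == b) with hrest
    have hdecomp : t = run ++ rest := (List.takeWhile_append_dropWhile).symm
    have hlen : rest.length < (b :: t).length := by
      simp only [List.length_cons]
      exact Nat.lt_succ_of_le (List.length_dropWhile_le _ _)
    have hhead : rest.head? ≠ some b := by
      intro hh
      have hx := List.head?_dropWhile_not (· == b) t
      rw [← hrest] at hx
      rw [hh] at hx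
      simp at hx
    have hrunall : ∀ x ∈ run, x = b := by
      intro x hx
      have := List.mem_takeWhile_imp hx
      simpa using this
    cases b with
    | true =>
      rw [if_pos rfl, ih rest hlen (max best ((run.length : Int) + 1)) (by omega), hdecomp]
      simp only [pvM]
      rw [show ((0:Int) + 1) = 1 by norm_num]
      rw [pvM_true_run run rest 1 (by intro x hx; simpa using hrunall x hx)]
      rw [pvM_not_true_head rest (1 + (run.length : Int)) (by
            intro hh; exact hhead (by simpa using hh)) (by positivity)]
      omega
    | false =>
      rw [if_neg (by decide), ih rest hlen best hb, hdecomp]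
      simp only [pvM]
      rw [pvM_false_run run rest (by intro x hx; simpa using hrunall x hx)]
      have := pvM_ge rest 0
      omega

-- ===== VERDICT (by name: the statement is the Claim_ definition above) =====
theorem contar_trechos_escuros_spec : Claim_equal_contar_trechos_escuros := by
  intro n potencias _ _
  unfold Spec_contar_trechos_escuros contar_trechos_escuros contar_trechos_escuros_alt
  rw [foldl_eq_pvScanA, pvScanA_eq _ 0 0 le_rfl le_rfl, pvRunGo_eq _ 0 le_rfl]
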